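-- pv_equiv track=rewrite | github.com/cubyto/Fundamentals-computing | matrix/exercices-21.py | draw_matrix
-- ===== SOURCE A (Python) =====
-- def draw_matrix(m, n):
--     matriz = []
--     matriz.append(["X" if j == 0 or j == n - 1 else " " for j in range(n)])
--     start = 0
--     limit = n
--     for i in range(m - 1):
--         element_rows = []
--         if i == int(m / 2):
--             element_rows = ["X" if j == int(n / 2) else " " for j in range(n)]
--         if i < int(m / 2):
--             start += 1
--             limit -= 1
--         else:
--             start -= 1
--             limit += 1
--         element_rows = ["X" if j == start or j == limit - 1 else " " for j in range(n)]
--         matriz.append(element_rows)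
--
--     return matriz
-- ===== SOURCE B (Python) =====
-- def draw_matrix(m, n):
--     total = 1 + max(m - 1, 0)
--     grid = [[" "] * n for _ in range(total)]
--
--     def mark(r, c):
--         if 0 <= c < n:
--             grid[r][c] = "X"
--
--     mark(0, 0)
--     mark(0, n - 1)
--     h = m // 2
--     for i in range(m - 1):
--         s = i + 1 if i < h else 2 * h - i - 1
--         mark(i + 1, s)
--         mark(i + 1, n - s - 1)
--     return grid
-- ===== Notes on version B (the rewrite author's own statement) =====
-- stated objective: simpler
-- what changed: Replaces A's threaded start/limit accumulators and per-row conditional comprehensions (plus a dead i==m//2 branch) by a blank grid fill with closed-form marking: row i gets 'X' at s = i+1 if i<m//2 else 2*(m//2)-i-1 and at its mirror n-s-1.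
import Mathlib
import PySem

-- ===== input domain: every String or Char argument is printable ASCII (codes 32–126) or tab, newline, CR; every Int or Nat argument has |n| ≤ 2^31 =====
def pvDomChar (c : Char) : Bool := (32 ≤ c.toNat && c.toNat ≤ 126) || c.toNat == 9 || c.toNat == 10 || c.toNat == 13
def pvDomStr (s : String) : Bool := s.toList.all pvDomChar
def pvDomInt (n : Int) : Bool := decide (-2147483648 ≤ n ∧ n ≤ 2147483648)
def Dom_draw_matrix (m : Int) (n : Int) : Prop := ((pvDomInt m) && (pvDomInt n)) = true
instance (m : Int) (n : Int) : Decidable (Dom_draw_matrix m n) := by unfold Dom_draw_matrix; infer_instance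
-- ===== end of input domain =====

-- B replaces A's threaded start/limit accumulators and conditional comprehensions (with a
-- dead i==int(m/2) branch) by a blank grid fill with closed-form marking of the two X columns.

-- ===== PORT A =====
-- int(m / 2): float division then int() truncates toward zero; exact as Int.tdiv on the domain.
-- the loop body of A, one step of the for-loop over i in range(m-1)
def pvStepA (m n : Int) (st : List (List String) × Int × Int) (i : Int) :
    List (List String) × Int × Int :=
  let matriz := st.1
  let start := st.2.1
  let limit := st.2.2
  let element_rows : List String := []
  let element_rows :=
    if i == Int.tdiv m 2 then
      (PySem.List.pyRange 0 n 1).map (fun j => if j == Int.tdiv n 2 then "X" else " ")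
    else element_rows
  let sl : Int × Int :=
    if i < Int.tdiv m 2 then (start + 1, limit - 1) else (start - 1, limit + 1)
  let start := sl.1
  let limit := sl.2
  let element_rows :=
    (PySem.List.pyRange 0 n 1).map (fun j => if j == start || j == limit - 1 then "X" else " ")
  (matriz ++ [element_rows], start, limit)

def draw_matrix (m : Int) (n : Int) : List (List String) :=
  let matriz : List (List String) :=
    [(PySem.List.pyRange 0 n 1).map (fun j => if j == 0 || j == n - 1 then "X" else " ")]
  let st := (PySem.List.pyRange 0 (m - 1) 1).foldl (pvStepA m n) (matriz, 0, n)
  st.1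

-- ===== PORT B =====
-- grid[r][c] = "X" when 0 <= c < n (B's mark helper; functional update in place of mutation)
def pvMarkB (row : List String) (c : Int) (n : Int) : List String :=
  if 0 ≤ c ∧ c < n then row.set c.toNat "X" else row

def draw_matrix_alt (m : Int) (n : Int) : List (List String) :=
  let blank : List String := List.replicate n.toNat " "
  let row0 := pvMarkB (pvMarkB blank 0 n) (n - 1) n
  let h := PySem.Int.floordiv m 2
  row0 ::
    (PySem.List.pyRange 0 (m - 1) 1).map (fun i =>
      let s := if i < h then i + 1 else 2 * h - i - 1
      pvMarkB (pvMarkB blank s n) (n - s - 1) n)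

-- ===== PRECONDITION & SPEC =====
def Spec_draw_matrix (m : Int) (n : Int) (out : List (List String)) : Prop := out = draw_matrix_alt m n
instance (m : Int) (n : Int) (out : List (List String)) : Decidable (Spec_draw_matrix m n out) := by unfold Spec_draw_matrix; infer_instance

-- ===== CLAIM (what is proved, stated in full; the proofs are below) =====
def Claim_equal_draw_matrix : Prop := ∀ (m : Int) (n : Int), Dom_draw_matrix m n → Spec_draw_matrix m n (draw_matrix m n)

-- ===== LEMMAS AND PROOFS =====

theorem length_pvMarkB (row : List String) (c n : Int) :
    (pvMarkB row c n).length = row.length := by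
  unfold pvMarkB; split <;> simp

theorem getElem_pvMarkB (row : List String) (c n : Int) (j : Nat) (hj : j < row.length)
    (hlen : row.length = n.toNat) :
    (pvMarkB row c n)[j]'(by rw [length_pvMarkB]; exact hj) =
      if c = (j : Int) then "X" else row[j] := by
  unfold pvMarkB
  split
  · rename_i h
    rcases h with ⟨h0, hn⟩
    rw [List.getElem_set]
    by_cases hc : c = (j : Int)
    · have ht : c.toNat = j := by omega
      simp [hc]
    · have ht : c.toNat ≠ j := by omega
      simp [ht, hc]
  · rename_i h
    have hcj : ¬ c = (j : Int) := by
      intro hc; subst hc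
      exact h ⟨Int.natCast_nonneg j, by omega⟩
    simp [hcj]

/-- marking two columns of a blank row equals the comprehension with the double condition -/
theorem mark2_eq (n a b : Int) :
    pvMarkB (pvMarkB (List.replicate n.toNat " ") a n) b n =
      (PySem.List.pyRange 0 n 1).map (fun j => if j == a || j == b then "X" else " ") := by
  rw [PySem.List.pyRange_one]
  apply List.ext_getElem
  · simp [length_pvMarkB]
  · intro j h1 h2
    have hlen1 : (pvMarkB (List.replicate n.toNat " ") a n).length = n.toNat := by
      simp [length_pvMarkB]
    have hjn : j < n.toNat := by
      have := h2; simp at this; omega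
    have hj : j < (pvMarkB (List.replicate n.toNat " ") a n).length := by
      rw [hlen1]; exact hjn
    rw [getElem_pvMarkB _ b n j hj hlen1]
    have hj' : j < (List.replicate n.toNat (" " : String)).length := by simpa using hjn
    rw [getElem_pvMarkB _ a n j hj' (by simp)]
    simp only [List.getElem_map, List.getElem_range, List.getElem_replicate, zero_add]
    split_ifs <;> simp_all; omega

/-- closed form of A's start accumulator after k loop iterations (h = int(m/2)) -/
def pvS (h : Int) (k : Nat) : Int := if (k : Int) ≤ h then (k : Int) else 2 * h - k

/-- one step of A's loop in closed form -/
theorem pvStepA_eq (m n : Int) (M : List (List String)) (s l i : Int) :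
    pvStepA m n (M, s, l) i =
      ((if i < Int.tdiv m 2 then
          (M ++ [(PySem.List.pyRange 0 n 1).map
              (fun j => if j == s + 1 || j == (l - 1) - 1 then "X" else " ")], s + 1, l - 1)
        else
          (M ++ [(PySem.List.pyRange 0 n 1).map
              (fun j => if j == s - 1 || j == (l + 1) - 1 then "X" else " ")], s - 1, l + 1))
        : List (List String) × Int × Int) := by
  unfold pvStepA
  by_cases hi : i < Int.tdiv m 2 <;> simp [hi]

theorem foldlA_invariant (m n : Int) (M0 : List (List String)) (hh : 0 ≤ Int.tdiv m 2) (k : Nat) :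
    (PySem.List.pyRange 0 (k : Int) 1).foldl (pvStepA m n) (M0, 0, n)
    = (M0 ++ (List.range k).map (fun t =>
          (PySem.List.pyRange 0 n 1).map (fun j =>
            if j == pvS (Int.tdiv m 2) (t + 1) || j == n - pvS (Int.tdiv m 2) (t + 1) - 1
            then "X" else " ")),
       pvS (Int.tdiv m 2) k, n - pvS (Int.tdiv m 2) k) := by
  induction k with
  | zero =>
    simp [pvS, hh]
  | succ k ih =>
    have hcast : ((k + 1 : Nat) : Int) = (k : Int) + 1 := by push_cast; ring
    rw [hcast, PySem.List.pyRange_one_succ_right (by positivity), List.foldl_append, ih,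
      List.foldl_cons, List.foldl_nil, pvStepA_eq]
    by_cases hk : ((k : Int)) < Int.tdiv m 2
    · have e1 : pvS (Int.tdiv m 2) k + 1 = pvS (Int.tdiv m 2) (k + 1) := by
        simp only [pvS]; push_cast; split_ifs <;> omega
      have e2 : (n - pvS (Int.tdiv m 2) k - 1) - 1 = n - pvS (Int.tdiv m 2) (k + 1) - 1 := by
        omega
      have e3 : n - pvS (Int.tdiv m 2) k - 1 = n - pvS (Int.tdiv m 2) (k + 1) := by omega
      rw [if_pos hk, e2, e3, e1, List.range_succ, List.map_append, ← List.append_assoc]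
      simp
    · have e1 : pvS (Int.tdiv m 2) k - 1 = pvS (Int.tdiv m 2) (k + 1) := by
        simp only [pvS]; push_cast; split_ifs <;> omega
      have e2 : (n - pvS (Int.tdiv m 2) k + 1) - 1 = n - pvS (Int.tdiv m 2) (k + 1) - 1 := by
        omega
      have e3 : n - pvS (Int.tdiv m 2) k + 1 = n - pvS (Int.tdiv m 2) (k + 1) := by omega
      rw [if_neg hk, e2, e3, e1, List.range_succ, List.map_append, ← List.append_assoc]
      simp

-- ===== VERDICT (by name: the statement is the Claim_ definition above) =====
theorem draw_matrix_spec : Claim_equal_draw_matrix := by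
  intro m n _
  unfold Spec_draw_matrix
  simp only [draw_matrix, draw_matrix_alt]
  by_cases hm : m ≤ 1
  · rw [show PySem.List.pyRange 0 (m - 1) 1 = [] from PySem.List.pyRange_one_eq_nil (by omega)]
    simp only [List.foldl_nil, List.map_nil]
    rw [mark2_eq n 0 (n - 1)]
  · have htd : Int.tdiv m 2 = m / 2 := Int.tdiv_eq_ediv_of_nonneg (by omega)
    have hfd : PySem.Int.floordiv m 2 = Int.tdiv m 2 := by
      rw [PySem.Int.floordiv_eq_ediv_of_pos (by omega), htd]
    have hh : 0 ≤ Int.tdiv m 2 := by rw [htd]; omega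
    have hkk : m - 1 = (((m - 1).toNat : Nat) : Int) := by omega
    rw [hkk, foldlA_invariant m n _ hh ((m - 1).toNat), hfd]
    rw [show PySem.List.pyRange 0 (((m - 1).toNat : Nat) : Int) 1
        = (List.range (m - 1).toNat).map (fun t : Nat => ((0 : Int) + t)) by
      rw [PySem.List.pyRange_one]; simp]
    simp only [List.map_map, List.cons_append, List.nil_append]
    congr 1
    · exact (mark2_eq n 0 (n - 1)).symm
    · apply List.map_congr_left
      intro t _
      have hs : (if ((0 : Int) + (t : Int)) < Int.tdiv m 2
            then (0 : Int) + (t : Int) + 1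
            else 2 * Int.tdiv m 2 - ((0 : Int) + (t : Int)) - 1)
          = pvS (Int.tdiv m 2) (t + 1) := by
        simp only [pvS]; push_cast; split_ifs <;> omega
      simp only [Function.comp_apply, hs]
      exact (mark2_eq n (pvS (Int.tdiv m 2) (t + 1)) (n - pvS (Int.tdiv m 2) (t + 1) - 1)).symm
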